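-- pv_equiv track=rewrite | github.com/KimJinHyeon0/Algorithm | LINE/Problem_1.py | solution
-- ===== SOURCE A (Python) =====
-- from collections import defaultdict
--
-- def solution(logs):
--     answer = []
--     problem_l = defaultdict(set)
--     user_l = set()
--     for log in logs:
--         user, problem = map(str, log.split())
--         user_l.add(user)
--         problem_l[problem].add(user)
--     for item in problem_l.items():
--         if len(item[1]) >= len(user_l)/2:
--             answer.append(item[0])
--     answer.sort()
--     return answer
-- ===== SOURCE B (Python) =====
-- def solution(logs):
--     users = set()
--     pairs = set()
--     for log in logs:
--         u, p = log.split()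
--         users.add(u)
--         pairs.add((p, u))
--     half = len(users) / 2
--     ordered = sorted(pairs)
--     answer = []
--     i = 0
--     while i < len(ordered):
--         p = ordered[i][0]
--         j = i
--         while j < len(ordered) and ordered[j][0] == p:
--             j += 1
--         if j - i >= half:
--             answer.append(p)
--         i = j
--     return answer
-- ===== Notes on version B (the rewrite author's own statement) =====
-- stated objective: alternative
-- what changed: B removes A's dict-of-user-sets grouping entirely: it collects a deduplicated (problem, user) pair set, sorts it once, and emits qualifying problems by a run-length group scan over the sorted pairs, so the answer comes out already in sorted order with no per-problem containers and no final sort of the answer.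
import Mathlib
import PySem

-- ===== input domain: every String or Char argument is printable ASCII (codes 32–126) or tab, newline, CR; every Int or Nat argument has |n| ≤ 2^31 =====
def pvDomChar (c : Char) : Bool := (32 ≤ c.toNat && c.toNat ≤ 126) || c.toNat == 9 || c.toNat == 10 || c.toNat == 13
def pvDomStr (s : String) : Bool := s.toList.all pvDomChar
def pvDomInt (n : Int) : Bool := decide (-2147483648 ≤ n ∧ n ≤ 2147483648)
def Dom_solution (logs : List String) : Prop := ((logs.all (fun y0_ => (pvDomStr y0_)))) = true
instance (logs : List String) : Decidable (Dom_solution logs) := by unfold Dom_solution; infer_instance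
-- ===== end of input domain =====

-- B removes A's dict-of-user-sets grouping: it sorts the deduplicated (problem, user) pair set
-- once and emits qualifying problems by a run-length group scan, already in sorted order.


-- ===== PORT A =====
-- 'user, problem = map(str, log.split())' raises ValueError unless the log has exactly two
-- words; Pre_solution admits exactly the two-word inputs, so the .getD defaults are never hit.
-- 'len(item[1]) >= len(user_l)/2' is ported as 'n ≤ 2 * cnt': exact, since for integers of this
-- magnitude the float n/2 is exact and cnt ≥ n/2 ↔ 2*cnt ≥ n.
def solution (logs : List String) : List String :=
  let st := logs.foldl
    (fun (st : PySem.Dict String (PySem.Set String) × PySem.Set String) log =>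
      let toks := PySem.Str.split₀ log
      let user := toks.getD 0 ""
      let problem := toks.getD 1 ""
      (st.1.insert problem (PySem.Set.add (st.1.getD problem PySem.Set.empty) user),
       PySem.Set.add st.2 user))
    (PySem.Dict.empty, PySem.Set.empty)
  let answer := st.1.items.foldl
    (fun answer item =>
      if ((st.2.length : Int) ≤ 2 * (item.2.length : Int)) then answer ++ [item.1] else answer) []
  PySem.List.sorted answer (fun x => x) false

-- ===== PORT B =====
-- the two nested while loops of Source B: the inner loop advances j to the end of the run of pairs
-- sharing the current problem (= takeWhile/dropWhile split), the outer loop continues at i = j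
def pvScan (n : Nat) : List (String × String) → List String
  | [] => []
  | q :: rest =>
      (if (n : Int) ≤ 2 * ((((q :: rest).takeWhile (fun r => r.1 == q.1)).length : Int)) then [q.1] else []) ++
        pvScan n ((q :: rest).dropWhile (fun r => r.1 == q.1))
  termination_by L => L.length
  decreasing_by
    simp only [List.dropWhile_cons, beq_self_eq_true, if_true]
    have := List.length_dropWhile_le (fun r : String × String => r.1 == q.1) rest
    simp only [List.length_cons]
    omega

def solution_alt (logs : List String) : List String :=
  let st := logs.foldl
    (fun (st : PySem.Set String × PySem.Set (String × String)) log =>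
      let toks := PySem.Str.split₀ log
      (PySem.Set.add st.1 (toks.getD 0 ""),
       PySem.Set.add st.2 (toks.getD 1 "", toks.getD 0 "")))
    (PySem.Set.empty, PySem.Set.empty)
  pvScan st.1.length (PySem.List.sorted2 st.2 Prod.fst Prod.snd false)

-- ===== PRECONDITION & SPEC =====
-- Pre_ excludes exactly the logs that do not split into two whitespace-separated words: there the
-- tuple unpacking 'user, problem = …' raises ValueError in A (and in B alike).
def Pre_solution (logs : List String) : Prop :=
  ∀ log ∈ logs, (PySem.Str.split₀ log).length = 2
instance (logs : List String) : Decidable (Pre_solution logs) := by unfold Pre_solution; infer_instance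
def pvWitness_solution : List String := ["alice p1", "bob p1", "alice p2"]

def Spec_solution (logs : List String) (out : List String) : Prop := out = solution_alt logs
instance (logs : List String) (out : List String) : Decidable (Spec_solution logs out) := by unfold Spec_solution; infer_instance

-- ===== CLAIM (what is proved, stated in full; the proofs are below) =====
def Claim_equal_solution : Prop := ∀ (logs : List String), Dom_solution logs → Pre_solution logs → Spec_solution logs (solution logs)

-- ===== LEMMAS AND PROOFS =====

-- the two token projections shared by both ports
def pvU (log : String) : String := (PySem.Str.split₀ log).getD 0 ""
def pvP (log : String) : String := (PySem.Str.split₀ log).getD 1 ""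
def pvPair (log : String) : String × String := (pvP log, pvU log)

-- Python's lexicographic order on (problem, user) pairs
def pvLe (a b : String × String) : Prop := a.1 < b.1 ∨ (a.1 = b.1 ∧ a.2 ≤ b.2)
def pvLt (a b : String × String) : Prop := a.1 < b.1 ∨ (a.1 = b.1 ∧ a.2 < b.2)

theorem pvLe_trans (a b c : String × String) (h1 : pvLe a b) (h2 : pvLe b c) : pvLe a c := by
  rcases h1 with h1 | ⟨e1, l1⟩
  · rcases h2 with h2 | ⟨e2, l2⟩
    · exact Or.inl (lt_trans h1 h2)
    · exact Or.inl (e2 ▸ h1)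
  · rcases h2 with h2 | ⟨e2, l2⟩
    · exact Or.inl (e1 ▸ h2)
    · exact Or.inr ⟨e1.trans e2, le_trans l1 l2⟩

theorem pvLt_fst_le (a b : String × String) (h : pvLt a b) : a.1 ≤ b.1 := by
  rcases h with h | ⟨e, _⟩
  · exact le_of_lt h
  · exact le_of_eq e

-- insertBy with a total 'before' preserves Pairwise of a transitive relation
theorem pv_insertBy_pairwise {α : Type} (R : α → α → Prop) (before : α → α → Bool)
    (htrans : ∀ a b c, R a b → R b c → R a c)
    (htrue : ∀ a b, before a b = true → R a b)
    (hfalse : ∀ a b, before a b = false → R b a)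
    (x : α) (ys : List α) (h : ys.Pairwise R) :
    (PySem.List.insertBy before x ys).Pairwise R := by
  induction ys with
  | nil => simp [PySem.List.insertBy]
  | cons y t ih =>
    rw [PySem.List.insertBy]
    by_cases hb : before x y = true
    · rw [if_pos hb]
      have hxy := htrue _ _ hb
      refine List.pairwise_cons.mpr ⟨?_, h⟩
      intro z hz
      rcases List.mem_cons.mp hz with rfl | hz
      · exact hxy
      · exact htrans _ _ _ hxy ((List.pairwise_cons.mp h).1 z hz)
    · rw [if_neg hb]
      have hyx := hfalse _ _ (Bool.eq_false_iff.mpr hb)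
      refine List.pairwise_cons.mpr ⟨?_, ih (List.pairwise_cons.mp h).2⟩
      intro z hz
      rcases (PySem.List.mem_insertBy _ _ _ _).mp hz with rfl | hz
      · exact hyx
      · exact (List.pairwise_cons.mp h).1 z hz

theorem pv_sorted2_pairwise_le (xs : List (String × String)) :
    (PySem.List.sorted2 xs Prod.fst Prod.snd false).Pairwise pvLe := by
  show (xs.foldl (fun acc x => PySem.List.insertBy _ x acc) []).Pairwise pvLe
  have key : ∀ (l : List (String × String)) (acc : List (String × String)),
      acc.Pairwise pvLe →
      (l.foldl (fun acc x => PySem.List.insertBy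
        (fun a b => decide (a.1 < b.1) || (!decide (b.1 < a.1) && decide (a.2 < b.2))) x acc) acc).Pairwise pvLe := by
    intro l
    induction l with
    | nil => intro acc h; exact h
    | cons x l ih =>
      intro acc h
      apply ih
      apply pv_insertBy_pairwise pvLe _ pvLe_trans
      · intro a b hb
        simp only [Bool.or_eq_true, Bool.and_eq_true, Bool.not_eq_eq_eq_not, Bool.not_true,
          decide_eq_true_eq, decide_eq_false_iff_not] at hb
        rcases hb with hb | ⟨hb1, hb2⟩
        · exact Or.inl hb
        · by_cases hlt : a.1 < b.1
          · exact Or.inl hlt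
          · exact Or.inr ⟨le_antisymm (not_lt.mp hb1) (not_lt.mp hlt), le_of_lt hb2⟩
      · intro a b hb
        simp only [Bool.or_eq_false_iff, Bool.and_eq_false_iff, Bool.not_eq_eq_eq_not,
          Bool.not_false, decide_eq_true_eq, decide_eq_false_iff_not] at hb
        obtain ⟨hb1, hb2⟩ := hb
        by_cases hlt : b.1 < a.1
        · exact Or.inl hlt
        · have he : b.1 = a.1 := le_antisymm (not_lt.mp hb1) (not_lt.mp hlt)
          rcases hb2 with hb2 | hb2
          · exact absurd hb2 hlt
          · exact Or.inr ⟨he, not_lt.mp hb2⟩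
      · exact h
  exact key xs [] List.Pairwise.nil

theorem pv_pairwise_lt_of_le_nodup (L : List (String × String))
    (hle : L.Pairwise pvLe) (hnd : L.Nodup) : L.Pairwise pvLt := by
  refine (hle.and hnd).imp ?_
  rintro a b ⟨h1, h2⟩
  rcases h1 with h1 | ⟨e, l⟩
  · exact Or.inl h1
  · refine Or.inr ⟨e, lt_of_le_of_ne l ?_⟩
    intro hsnd
    exact h2 (Prod.ext e hsnd)

-- Set.ofList keeps a sublist (first occurrences in order)
theorem pv_ofList_sublist {α : Type} [BEq α] [LawfulBEq α] (xs : List α) :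
    (PySem.Set.ofList xs).Sublist xs := by
  induction xs using List.reverseRecOn with
  | nil => simp
  | append_singleton xs x ih =>
    rw [PySem.Set.ofList_append_singleton]
    by_cases hx : x ∈ PySem.Set.ofList xs
    · rw [PySem.Set.add_of_mem hx]
      exact ih.trans (List.sublist_append_left xs [x])
    · rw [PySem.Set.add_of_not_mem hx]
      exact ih.append (List.Sublist.refl [x])

-- building the Set from a constant-valued block then fresh elements
theorem pv_update_cons {α : Type} [BEq α] [LawfulBEq α] (a : α) (s d : List α)
    (had : a ∉ d) (has : a ∉ s) :
    PySem.Set.update (a :: s) d = a :: PySem.Set.update s d := by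
  induction d generalizing s with
  | nil => rfl
  | cons x d ih =>
    have hax : a ≠ x := fun h => had (h ▸ List.mem_cons_self)
    have hadd : PySem.Set.add (a :: s) x = a :: PySem.Set.add s x := by
      simp only [PySem.Set.add, PySem.Set.contains, List.contains_cons]
      have hxa : (x == a) = false := by simpa using hax.symm
      rw [hxa, Bool.false_or]
      split <;> rfl
    show PySem.Set.update (PySem.Set.add (a :: s) x) d = a :: PySem.Set.update (PySem.Set.add s x) d
    rw [hadd]
    apply ih
    · exact fun h => had (List.mem_cons_of_mem _ h)
    · intro h
      rcases (PySem.Set.mem_add _ _ _).mp h with h | h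
      · exact has h
      · exact hax h

theorem pv_update_const {α : Type} [BEq α] [LawfulBEq α] (a : α) (c : List α)
    (hc : ∀ x ∈ c, x = a) : PySem.Set.update [a] c = [a] := by
  induction c with
  | nil => rfl
  | cons x c ih =>
    have hx : x = a := hc x List.mem_cons_self
    subst hx
    show PySem.Set.update (PySem.Set.add [x] x) c = [x]
    rw [PySem.Set.add_of_mem List.mem_cons_self]
    exact ih (fun y hy => hc y (List.mem_cons_of_mem _ hy))

theorem pv_ofList_const_append {α : Type} [BEq α] [LawfulBEq α] (a : α) (c d : List α)
    (hc : ∀ x ∈ c, x = a) (hne : c ≠ []) (had : a ∉ d) :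
    PySem.Set.ofList (c ++ d) = a :: PySem.Set.ofList d := by
  rw [PySem.Set.ofList_eq_foldl, List.foldl_append]
  have hc' : (c.foldl PySem.Set.add []) = [a] := by
    cases c with
    | nil => exact absurd rfl hne
    | cons x c =>
      have hx : x = a := hc x List.mem_cons_self
      subst hx
      show PySem.Set.update (PySem.Set.add [] x) c = [x]
      have : PySem.Set.add ([] : List α) x = [x] := rfl
      rw [this]
      exact pv_update_const x c (fun y hy => hc y (List.mem_cons_of_mem _ hy))
  rw [hc']
  show PySem.Set.update [a] d = a :: PySem.Set.update [] d
  rw [pv_update_cons a [] d had (List.not_mem_nil)]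

-- in a pvLt-sorted list whose heads are all ≥ a, nothing after the run of a's is an a
theorem pv_drop_ne (a : String) :
    ∀ (l : List (String × String)), l.Pairwise pvLt → (∀ z ∈ l, a ≤ z.1) →
      ∀ z ∈ l.dropWhile (fun r => r.1 == a), z.1 ≠ a := by
  intro l
  induction l with
  | nil => intro _ _ z hz; simp at hz
  | cons h t ih =>
    intro hpw hge z hz
    by_cases hh : (h.1 == a) = true
    · rw [List.dropWhile_cons, if_pos hh] at hz
      exact ih (List.pairwise_cons.mp hpw).2 (fun y hy => hge y (List.mem_cons_of_mem _ hy)) z hz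
    · rw [List.dropWhile_cons, if_neg hh] at hz
      have hhne : h.1 ≠ a := by simpa using hh
      have hha : a < h.1 := lt_of_le_of_ne (hge h List.mem_cons_self) (Ne.symm hhne)
      rcases List.mem_cons.mp hz with rfl | hz
      · exact hhne
      · intro he
        have hle : h.1 ≤ z.1 := pvLt_fst_le _ _ ((List.pairwise_cons.mp hpw).1 z hz)
        rw [he] at hle
        exact absurd (lt_of_lt_of_le hha hle) (lt_irrefl a)

-- the group scan over a strictly sorted pair list = the half-threshold filter of its distinct firsts
theorem pv_scan_eq (n : Nat) (L : List (String × String)) (h : L.Pairwise pvLt) :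
    pvScan n L = (PySem.Set.ofList (L.map Prod.fst)).filter
      (fun k => decide ((n : Int) ≤ 2 * ((L.countP (fun q => q.1 == k)) : Int))) := by
  match L with
  | [] => simp [pvScan]
  | q :: rest =>
    have hfstge : ∀ z ∈ q :: rest, q.1 ≤ z.1 := by
      intro z hz
      rcases List.mem_cons.mp hz with rfl | hz
      · exact le_refl _
      · exact pvLt_fst_le _ _ ((List.pairwise_cons.mp h).1 z hz)
    have hdropne : ∀ z ∈ (q :: rest).dropWhile (fun r => r.1 == q.1), z.1 ≠ q.1 :=
      pv_drop_ne q.1 (q :: rest) h hfstge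
    have hdroppw : ((q :: rest).dropWhile (fun r => r.1 == q.1)).Pairwise pvLt :=
      h.sublist (List.dropWhile_sublist _)
    have hsplit : (q :: rest).takeWhile (fun r => r.1 == q.1) ++ (q :: rest).dropWhile (fun r => r.1 == q.1) = q :: rest :=
      List.takeWhile_append_dropWhile
    have hrunall : ∀ x ∈ (q :: rest).takeWhile (fun r => r.1 == q.1), x.1 = q.1 := by
      intro x hx
      have hx' := List.mem_takeWhile_imp (p := fun r : String × String => r.1 == q.1) hx
      simpa using hx'
    have hrunne : (q :: rest).takeWhile (fun r => r.1 == q.1) ≠ [] := by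
      rw [List.takeWhile_cons, if_pos (by simp)]
      exact List.cons_ne_nil _ _
    have hcount : (q :: rest).countP (fun r => r.1 == q.1) = ((q :: rest).takeWhile (fun r => r.1 == q.1)).length := by
      conv_lhs => rw [← hsplit]
      rw [List.countP_append]
      have h1 : ((q :: rest).takeWhile (fun r => r.1 == q.1)).countP (fun r => r.1 == q.1)
          = ((q :: rest).takeWhile (fun r => r.1 == q.1)).length := by
        rw [List.countP_eq_length]
        intro x hx
        exact List.mem_takeWhile_imp (p := fun r : String × String => r.1 == q.1) hx

      have h2 : ((q :: rest).dropWhile (fun r => r.1 == q.1)).countP (fun r => r.1 == q.1) = 0 := by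
        rw [List.countP_eq_zero]
        intro x hx
        simpa using hdropne x hx
      omega
    have hqnotdrop : q.1 ∉ ((q :: rest).dropWhile (fun r => r.1 == q.1)).map Prod.fst := by
      intro hmem
      rcases List.mem_map.mp hmem with ⟨z, hz, hz1⟩
      exact hdropne z hz hz1
    have hof : PySem.Set.ofList ((q :: rest).map Prod.fst)
        = q.1 :: PySem.Set.ofList (((q :: rest).dropWhile (fun r => r.1 == q.1)).map Prod.fst) := by
      conv_lhs => rw [← hsplit]
      rw [List.map_append]
      apply pv_ofList_const_append
      · intro x hx
        rcases List.mem_map.mp hx with ⟨z, hz, hz1⟩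
        exact hz1 ▸ hrunall z hz
      · simp only [ne_eq, List.map_eq_nil_iff]; exact hrunne
      · exact hqnotdrop
    have ih := pv_scan_eq n ((q :: rest).dropWhile (fun r => r.1 == q.1)) hdroppw
    rw [pvScan, ih, hof, List.filter_cons]
    have hcongr : ∀ k ∈ PySem.Set.ofList (((q :: rest).dropWhile (fun r => r.1 == q.1)).map Prod.fst),
        (decide ((n : Int) ≤ 2 * ((((q :: rest).dropWhile (fun r => r.1 == q.1)).countP (fun p => p.1 == k)) : Int)))
          = (decide ((n : Int) ≤ 2 * (((q :: rest).countP (fun p => p.1 == k)) : Int))) := by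
      intro k hk
      have hkne : k ≠ q.1 := by
        rcases List.mem_map.mp ((PySem.Set.mem_ofList _ _).mp hk) with ⟨z, hz, hz1⟩
        intro he
        have : ∀ y ∈ (q :: rest).dropWhile (fun r => r.1 == q.1), y.1 ≠ q.1 := hdropne
        exact this z hz (hz1.trans he)
      have : (q :: rest).countP (fun p => p.1 == k)
          = ((q :: rest).dropWhile (fun r => r.1 == q.1)).countP (fun p => p.1 == k) := by
        conv_lhs => rw [← hsplit]
        rw [List.countP_append]
        have : ((q :: rest).takeWhile (fun r => r.1 == q.1)).countP (fun p => p.1 == k) = 0 := by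
          rw [List.countP_eq_zero]
          intro x hx
          have := hrunall x hx
          simp [this, Ne.symm hkne]
        omega
      rw [this]
    rw [List.filter_congr hcongr]
    have hcond : ((n : Int) ≤ 2 * ((((q :: rest).takeWhile (fun r => r.1 == q.1)).length : Nat) : Int))
        ↔ ((n : Int) ≤ 2 * (((q :: rest).countP (fun p => p.1 == q.1)) : Int)) := by
      rw [hcount]
    by_cases hc : (n : Int) ≤ 2 * ((((q :: rest).takeWhile (fun r => r.1 == q.1)).length : Nat) : Int)
    · rw [if_pos hc, if_pos (by exact decide_eq_true (hcond.mp hc))]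
      rfl
    · rw [if_neg hc, if_neg (by simpa using (fun h' => hc (hcond.mpr h')))]
      rfl
  termination_by L.length
  decreasing_by
    simp only [List.dropWhile_cons, beq_self_eq_true, if_true]
    have := List.length_dropWhile_le (fun r : String × String => r.1 == q.1) rest
    simp only [List.length_cons]
    omega

-- invariant linking A's grouped dict with B's pair set: the dict's value at k is exactly the
-- (ordered) list of users paired with k in the pair set
theorem pv_invariant (logs : List String)
    (d : PySem.Dict String (PySem.Set String)) (s : PySem.Set (String × String))
    (hnd : s.Nodup)
    (h : ∀ k, d.getD k PySem.Set.empty = (s.filter (fun q => q.1 == k)).map Prod.snd) :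
    ∀ k,
      (logs.foldl (fun d log => d.insert (pvP log) (PySem.Set.add (d.getD (pvP log) PySem.Set.empty) (pvU log))) d).getD k PySem.Set.empty
        = ((logs.foldl (fun s log => PySem.Set.add s (pvPair log)) s).filter (fun q => q.1 == k)).map Prod.snd := by
  induction logs generalizing d s with
  | nil => exact h
  | cons log logs ih =>
    simp only [List.foldl_cons]
    apply ih
    · exact PySem.Set.nodup_add _ _ hnd
    · intro k
      rw [PySem.Dict.getD_insert]
      by_cases hmem : pvPair log ∈ s
      · rw [PySem.Set.add_of_mem hmem]
        by_cases hk : k = pvP log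
        · subst hk
          have hm : pvU log ∈ (s.filter (fun q => q.1 == pvP log)).map Prod.snd :=
            List.mem_map.mpr ⟨pvPair log, List.mem_filter.mpr ⟨hmem, by simp [pvPair]⟩, rfl⟩
          rw [if_pos rfl, h, PySem.Set.add_of_mem hm]
        · rw [if_neg hk, h]
      · rw [PySem.Set.add_of_not_mem hmem, List.filter_append]
        by_cases hk : k = pvP log
        · subst hk
          have hfilt : List.filter (fun q => q.1 == pvP log) [pvPair log] = [pvPair log] := by
            simp [pvPair]
          have hnotin : pvU log ∉ (s.filter (fun q => q.1 == pvP log)).map Prod.snd := by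
            intro hin
            rcases List.mem_map.mp hin with ⟨q, hq, hq2⟩
            rcases List.mem_filter.mp hq with ⟨hqs, hq1⟩
            apply hmem
            have : q = pvPair log := by
              rcases q with ⟨a, b⟩
              simp only [beq_iff_eq] at hq1
              simp only [pvPair]
              simp only at hq1 hq2 ⊢
              exact Prod.ext hq1 hq2
            rwa [this] at hqs
          rw [if_pos rfl, hfilt, h, List.map_append, PySem.Set.add_of_not_mem hnotin]
          rfl
        · have hfilt : List.filter (fun q => q.1 == k) [pvPair log] = [] := by
            simp only [List.filter_cons, List.filter_nil, pvPair]
            rw [if_neg]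
            simp only [beq_iff_eq]
            exact fun h' => hk h'.symm
          rw [if_neg hk, hfilt, List.append_nil, h]

-- ===== VERDICT (by name: the statement is the Claim_ definition above) =====
theorem solution_spec : Claim_equal_solution := by
  intro logs _ _
  unfold Spec_solution solution solution_alt
  rw [PySem.List.foldl_prod_mk
      (fun (d : PySem.Dict String (PySem.Set String)) log =>
        d.insert ((PySem.Str.split₀ log).getD 1 "")
          (PySem.Set.add (d.getD ((PySem.Str.split₀ log).getD 1 "") PySem.Set.empty) ((PySem.Str.split₀ log).getD 0 "")))
      (fun (s : PySem.Set String) log => PySem.Set.add s ((PySem.Str.split₀ log).getD 0 "")),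
    PySem.List.foldl_prod_mk
      (fun (s : PySem.Set String) log => PySem.Set.add s ((PySem.Str.split₀ log).getD 0 ""))
      (fun (s : PySem.Set (String × String)) log =>
        PySem.Set.add s ((PySem.Str.split₀ log).getD 1 "", (PySem.Str.split₀ log).getD 0 ""))]
  set U : PySem.Set String := logs.foldl (fun s log => PySem.Set.add s ((PySem.Str.split₀ log).getD 0 "")) PySem.Set.empty with hU
  have hfoldd :
      (logs.foldl (fun (d : PySem.Dict String (PySem.Set String)) log =>
          d.insert ((PySem.Str.split₀ log).getD 1 "")
            (PySem.Set.add (d.getD ((PySem.Str.split₀ log).getD 1 "") PySem.Set.empty) ((PySem.Str.split₀ log).getD 0 "")))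
        PySem.Dict.empty)
      = logs.foldl (fun d log => d.insert (pvP log) (PySem.Set.add (d.getD (pvP log) PySem.Set.empty) (pvU log))) PySem.Dict.empty := rfl
  have hfolds :
      (logs.foldl (fun (s : PySem.Set (String × String)) log =>
          PySem.Set.add s ((PySem.Str.split₀ log).getD 1 "", (PySem.Str.split₀ log).getD 0 "")) PySem.Set.empty)
      = logs.foldl (fun s log => PySem.Set.add s (pvPair log)) PySem.Set.empty := rfl
  rw [hfoldd, hfolds]
  set d := logs.foldl (fun d log => d.insert (pvP log) (PySem.Set.add (d.getD (pvP log) PySem.Set.empty) (pvU log))) PySem.Dict.empty with hd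
  set prs := logs.foldl (fun s log => PySem.Set.add s (pvPair log)) PySem.Set.empty with hprs
  -- facts
  have hkeysnd : d.keys.Nodup := by
    rw [hd]
    exact PySem.Dict.nodup_keys_foldl_insert_key logs pvP _ _ PySem.Dict.nodup_keys_empty
  have hkeys : d.keys = PySem.Set.ofList (logs.map pvP) := by
    rw [hd, PySem.Dict.keys_foldl_insert_key]
    exact PySem.Set.update_empty _
  have hprs_eq : prs = PySem.Set.ofList (logs.map pvPair) := by
    rw [hprs, ← PySem.Set.update_map_eq_foldl_add]
    exact PySem.Set.update_empty _
  have hnodup_prs : prs.Nodup := by rw [hprs_eq]; exact PySem.Set.nodup_ofList _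
  have hinv : ∀ k, d.getD k PySem.Set.empty = (prs.filter (fun q => q.1 == k)).map Prod.snd := by
    rw [hd, hprs]
    exact pv_invariant logs PySem.Dict.empty PySem.Set.empty List.nodup_nil (fun k => rfl)
  -- the sorted pair list
  set L := PySem.List.sorted2 prs Prod.fst Prod.snd false with hL
  have hLperm : L.Perm prs := PySem.List.sorted2_perm prs Prod.fst Prod.snd false
  have hLnodup : L.Nodup := hLperm.nodup_iff.mpr hnodup_prs
  have hLlt : L.Pairwise pvLt :=
    pv_pairwise_lt_of_le_nodup L (hL ▸ pv_sorted2_pairwise_le prs) hLnodup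
  -- B side: the group scan is the threshold filter of the distinct sorted firsts
  rw [pv_scan_eq U.length L hLlt]
  -- A side: normalise the append-if loop into a filter over the keys
  have hconv : ∀ (acc : List String) (item : String × PySem.Set String),
      (if ((U.length : Int) ≤ 2 * (item.2.length : Int)) then acc ++ [item.1] else acc)
        = (if (fun it : String × PySem.Set String => decide ((U.length : Int) ≤ 2 * (it.2.length : Int))) item = true then acc ++ [Prod.fst item] else acc) := by
    intro acc item; simp
  simp only [hconv]
  rw [PySem.List.foldl_append_if, List.nil_append,
    PySem.Dict.items_eq_map_keys d hkeysnd PySem.Set.empty, List.filter_map, List.map_map]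
  have hcomp : (Prod.fst ∘ fun k => (k, d.getD k PySem.Set.empty)) = fun (k : String) => k := rfl
  rw [hcomp, List.map_id']
  -- identify the two filter predicates on the keys
  have hPA : ∀ k, (d.getD k PySem.Set.empty).length = L.countP (fun q => q.1 == k) := by
    intro k
    rw [hinv k, List.length_map, ← List.countP_eq_length_filter]
    exact (hLperm.countP_eq _).symm
  have hfilter :
      d.keys.filter ((fun it : String × PySem.Set String => decide ((U.length : Int) ≤ 2 * (it.2.length : Int))) ∘ fun k => (k, d.getD k PySem.Set.empty))
        = d.keys.filter (fun k => decide ((U.length : Int) ≤ 2 * ((L.countP (fun q => q.1 == k)) : Int))) := by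
    apply List.filter_congr
    intro k _
    simp only [Function.comp]
    rw [hPA k]
  rw [hfilter]
  -- both sides are now the same filter of mem-equal nodup lists; the right one is strictly sorted
  have hmemL : ∀ k, k ∈ PySem.Set.ofList (L.map Prod.fst) ↔ k ∈ d.keys := by
    intro k
    rw [hkeys, PySem.Set.mem_ofList, PySem.Set.mem_ofList]
    constructor
    · intro h
      rcases List.mem_map.mp h with ⟨z, hz, hz1⟩
      have hz' : z ∈ prs := hLperm.subset hz
      rw [hprs_eq] at hz'
      rcases List.mem_map.mp ((PySem.Set.mem_ofList _ _).mp hz') with ⟨lg, hlg, hlg1⟩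
      exact List.mem_map.mpr ⟨lg, hlg, by rw [← hlg1] at hz1; exact hz1⟩
    · intro h
      rcases List.mem_map.mp h with ⟨lg, hlg, hlg1⟩
      have hmem : pvPair lg ∈ prs := by
        rw [hprs_eq]
        exact (PySem.Set.mem_ofList _ _).mpr (List.mem_map.mpr ⟨lg, hlg, rfl⟩)
      have hzL : pvPair lg ∈ L := hLperm.mem_iff.mpr hmem
      exact List.mem_map.mpr ⟨pvPair lg, hzL, hlg1⟩
  apply PySem.List.sorted_eq_of_perm_of_pairwise_lt
  · -- permutation of the two filters
    refine (List.perm_ext_iff_of_nodup ?_ ?_).mpr ?_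
    · exact (PySem.Set.nodup_ofList _).filter _
    · exact hkeysnd.filter _
    · intro k
      rw [List.mem_filter, List.mem_filter, hmemL k]
  · -- strict sortedness of the filtered distinct firsts
    apply List.Pairwise.filter
    have h1 : (L.map Prod.fst).Pairwise (fun a b => a ≤ b) :=
      hLlt.map Prod.fst (fun {a b} h => pvLt_fst_le a b h)
    have h2 : (PySem.Set.ofList (L.map Prod.fst)).Pairwise (fun a b => a ≤ b) :=
      h1.sublist (pv_ofList_sublist _)
    have h3 : (PySem.Set.ofList (L.map Prod.fst)).Nodup := PySem.Set.nodup_ofList _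
    refine (h2.and h3).imp ?_
    rintro a b ⟨hle, hne⟩
    exact lt_of_le_of_ne hle hne
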